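-- pv_equiv track=rewrite | github.com/mehrdadhalali/Advent-Of-Code | 2021/day_8.py | calculate_codes
-- ===== SOURCE A (Python) =====
-- def calculate_codes(line_inputs: list[str]) -> dict:
--     """Given the inputs of a line, returns each letter, along with its code."""
--
--     letter_to_code = {char: "" for char in "abcdefg"}
--
--     for i in [3, 4, 6]:
--         for letter in "abcdefg":
--             letter_to_code[letter] += str(len([string
--                                                for string in line_inputs
--                                                if len(string) == i
--                                                and letter in string]))
--
--     return letter_to_code
-- ===== SOURCE B (Python) =====
-- def calculate_codes(line_inputs: list[str]) -> dict:
--     """Given the inputs of a line, returns each letter, along with its code."""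
--     table = {}
--     for string in line_inputs:
--         n = len(string)
--         if n == 3 or n == 4 or n == 6:
--             for letter in set(string):
--                 key = (n, letter)
--                 table[key] = table.get(key, 0) + 1
--     return {letter: "".join(str(table.get((i, letter), 0)) for i in (3, 4, 6))
--             for letter in "abcdefg"}
-- ===== Notes on version B (the rewrite author's own statement) =====
-- stated objective: alternative
-- what changed: Replaces A's 21 separate full scans of line_inputs (one per (segment-length i, letter) pair) with a single counting pass building a (length, letter) -> count table, followed by a separate assembly pass over 'abcdefg'.
import Mathlib
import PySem

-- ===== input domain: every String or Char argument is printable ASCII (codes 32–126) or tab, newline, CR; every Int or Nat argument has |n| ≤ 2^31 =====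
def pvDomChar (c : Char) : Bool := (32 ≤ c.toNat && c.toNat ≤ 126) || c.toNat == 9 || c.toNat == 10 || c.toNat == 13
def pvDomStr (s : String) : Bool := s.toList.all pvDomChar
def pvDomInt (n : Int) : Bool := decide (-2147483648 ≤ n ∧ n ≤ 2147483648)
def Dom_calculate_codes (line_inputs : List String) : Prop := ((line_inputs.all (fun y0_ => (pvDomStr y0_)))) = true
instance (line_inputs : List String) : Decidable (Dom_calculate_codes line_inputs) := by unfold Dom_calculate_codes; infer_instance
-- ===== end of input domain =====

-- B replaces A's 21 full scans of line_inputs with one counting pass into a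
-- (length, letter) -> count table plus a separate assembly pass over 'abcdefg'.


-- ===== PORT A =====
-- letter_to_code = {char: "" for char in "abcdefg"}; then for i in [3,4,6], for letter in "abcdefg":
--   letter_to_code[letter] += str(len([s for s in line_inputs if len(s) == i and letter in s]))
def calculate_codes (line_inputs : List String) : List (String × String) :=
  let letters := "abcdefg".toList
  let letter_to_code : PySem.Dict String String :=
    letters.foldl (fun d ch => d.insert (String.ofList [ch]) "") PySem.Dict.empty
  let final := ([3, 4, 6] : List Int).foldl (fun d i =>
    letters.foldl (fun d ch =>
      d.modify (String.ofList [ch]) ""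
        (fun v => v ++ PySem.Int.toStr
          ((line_inputs.filter
              (fun s => PySem.Str.len s == i && PySem.Str.isIn (String.ofList [ch]) s)).length : Int))) d)
    letter_to_code
  final.items

-- ===== PORT B =====
-- one counting pass: table[(len, letter)] += 1 for each distinct letter of each 3/4/6-length string;
-- then assemble {letter: "".join(str(table.get((i, letter), 0)) for i in (3,4,6)) for letter in "abcdefg"}
def calculate_codes_alt (line_inputs : List String) : List (String × String) :=
  let table : PySem.Dict (Int × Char) Int :=
    line_inputs.foldl (fun d s =>
      let n : Int := PySem.Str.len s
      if n == 3 || n == 4 || n == 6 then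
        (PySem.Set.ofList s.toList).foldl
          (fun d c => d.insert (n, c) (d.getD (n, c) 0 + 1)) d
      else d) PySem.Dict.empty
  "abcdefg".toList.map (fun c =>
    (String.ofList [c],
     PySem.Str.join ""
       (([3, 4, 6] : List Int).map (fun i => PySem.Int.toStr (table.getD (i, c) 0)))))

-- ===== PRECONDITION & SPEC =====
def Spec_calculate_codes (line_inputs : List String) (out : List (String × String)) : Prop := out = calculate_codes_alt line_inputs
instance (line_inputs : List String) (out : List (String × String)) : Decidable (Spec_calculate_codes line_inputs out) := by unfold Spec_calculate_codes; infer_instance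

-- ===== CLAIM (what is proved, stated in full; the proofs are below) =====
def Claim_equal_calculate_codes : Prop := ∀ (line_inputs : List String), Dom_calculate_codes line_inputs → Spec_calculate_codes line_inputs (calculate_codes line_inputs)

-- ===== LEMMAS AND PROOFS =====

-- the count A computes for segment-length i and letter c
def pvCnt (line_inputs : List String) (i : Int) (c : Char) : Nat :=
  line_inputs.countP (fun s => PySem.Str.len s == i && PySem.Str.isIn (String.ofList [c]) s)

-- B's counting loop, named for the lemmas
def pvTable (line_inputs : List String) (d : PySem.Dict (Int × Char) Int) : PySem.Dict (Int × Char) Int :=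
  line_inputs.foldl (fun d s =>
    let n : Int := PySem.Str.len s
    if n == 3 || n == 4 || n == 6 then
      (PySem.Set.ofList s.toList).foldl
        (fun d c => d.insert (n, c) (d.getD (n, c) 0 + 1)) d
    else d) d

-- proof-only abbreviation for the letter list
def pvLetters : List Char := ['a', 'b', 'c', 'd', 'e', 'f', 'g']

lemma pv_toList_abc : "abcdefg".toList = pvLetters := by decide

lemma pv_key_ne {a b : Char} (h : a ≠ b) : String.ofList [a] ≠ String.ofList [b] := by
  intro hc; apply h; simpa using congrArg String.toList hc

lemma pv_isIn_singleton (c : Char) (s : String) :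
    PySem.Str.isIn (String.ofList [c]) s = decide (c ∈ s.toList) := by
  rw [Bool.eq_iff_iff, PySem.Str.isIn_iff_infix]; simp [List.singleton_infix_iff]

lemma pv_count_pair (n i : Int) (c : Char) (l : List Char) :
    List.count (i, c) ((PySem.Set.ofList l).map (fun x => (n, x)))
      = if i = n ∧ c ∈ l then 1 else 0 := by
  by_cases hni : i = n
  · subst hni
    rw [List.count_map_of_injective _ _ (fun a b h => by simpa using h)]
    by_cases hc : c ∈ l
    · simp [hc]
    · rw [List.count_eq_zero_of_not_mem (fun hm => hc ((PySem.Set.mem_ofList l c).mp hm))]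
      simp [hc]
  · rw [List.count_eq_zero_of_not_mem (fun hm => by
      obtain ⟨x, _, hx⟩ := List.mem_map.mp hm
      exact hni (congrArg Prod.fst hx).symm)]
    simp [hni]

lemma pvTable_getD (line_inputs : List String) (d : PySem.Dict (Int × Char) Int)
    (i : Int) (c : Char) (hi : i = 3 ∨ i = 4 ∨ i = 6) :
    (pvTable line_inputs d).getD (i, c) 0 = d.getD (i, c) 0 + (pvCnt line_inputs i c : Int) := by
  induction line_inputs generalizing d with
  | nil => simp [pvTable, pvCnt]
  | cons s rest ih =>
    rw [show pvTable (s :: rest) d = pvTable rest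
      (let n : Int := PySem.Str.len s
       if n == 3 || n == 4 || n == 6 then
         (PySem.Set.ofList s.toList).foldl
           (fun d c => d.insert (n, c) (d.getD (n, c) 0 + 1)) d
       else d) from rfl]
    rw [ih]
    have hcnt : (pvCnt (s :: rest) i c : Int)
        = (pvCnt rest i c : Int) + (if (PySem.Str.len s == i
            && PySem.Str.isIn (String.ofList [c]) s) = true then 1 else 0) := by
      simp only [pvCnt, List.countP_cons]
      push_cast
      split_ifs <;> simp
    rw [hcnt]
    by_cases hn : ((PySem.Str.len s == 3 || PySem.Str.len s == 4 || PySem.Str.len s == 6) = true)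
    · simp only [hn, if_pos]
      rw [← List.foldl_map (f := fun x => (PySem.Str.len s, x))
          (g := fun (d : PySem.Dict (Int × Char) Int) x => d.insert x (d.getD x 0 + 1))]
      rw [PySem.Dict.getD_foldl_insert_add_one]
      rw [pv_count_pair]
      rw [pv_isIn_singleton]
      push_cast
      have hiff : (if i = PySem.Str.len s ∧ c ∈ s.toList then (1 : Int) else 0)
          = (if (PySem.Str.len s == i && decide (c ∈ s.toList)) = true then (1 : Int) else 0) := by
        by_cases h1 : i = PySem.Str.len s
        · by_cases h2 : c ∈ s.toList <;> simp [h1, h2]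
        · have hne : (PySem.Str.len s == i) = false :=
            beq_eq_false_iff_ne.mpr (fun h => h1 h.symm)
          rw [hne, Bool.false_and, if_neg (fun h => h1 h.1), if_neg (by simp)]
      rw [hiff]
      ring
    · simp only [hn, if_neg, Bool.not_eq_true]
      have hfalse : (PySem.Str.len s == i) = false := by
        rw [beq_eq_false_iff_ne]
        simp only [Bool.or_eq_true, beq_iff_eq] at hn
        rcases hi with rfl | rfl | rfl <;> tauto
      rw [hfalse, Bool.false_and]
      simp

-- skipping a modify-fold at keys not in L leaves the entry unchanged
lemma pv_getD_fold_not_mem (L : List Char) (f : Char → String → String)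
    (d : PySem.Dict String String) (c : Char) (h : c ∉ L) :
    (L.foldl (fun d ch => d.modify (String.ofList [ch]) "" (f ch)) d).getD (String.ofList [c]) ""
      = d.getD (String.ofList [c]) "" := by
  induction L generalizing d with
  | nil => rfl
  | cons a L ih =>
    rw [List.foldl_cons, ih _ (fun hm => h (List.mem_cons_of_mem _ hm)),
      PySem.Dict.getD_modify_of_ne _ _ _
        (pv_key_ne (fun hc => h (by rw [hc]; exact List.mem_cons_self)))]

-- one modify-pass over distinct keys applies f once at each key
lemma pv_getD_fold_mem (L : List Char) (f : Char → String → String)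
    (d : PySem.Dict String String) (c : Char) (hnd : L.Nodup) (hc : c ∈ L) :
    (L.foldl (fun d ch => d.modify (String.ofList [ch]) "" (f ch)) d).getD (String.ofList [c]) ""
      = f c (d.getD (String.ofList [c]) "") := by
  induction L generalizing d with
  | nil => cases hc
  | cons a L ih =>
    rw [List.foldl_cons]
    rcases List.mem_cons.mp hc with rfl | hm
    · rw [pv_getD_fold_not_mem _ _ _ _ (List.nodup_cons.mp hnd).1,
        PySem.Dict.getD_modify_self]
    · have hne : c ≠ a := fun hca => (List.nodup_cons.mp hnd).1 (hca ▸ hm)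
      rw [ih _ (List.nodup_cons.mp hnd).2 hm,
        PySem.Dict.getD_modify_of_ne _ _ _ (pv_key_ne hne)]

-- a modify-fold at keys already present does not change the key list
lemma pv_keys_fold (L : List Char) (f : Char → String → String)
    (d : PySem.Dict String String) (h : ∀ ch ∈ L, String.ofList [ch] ∈ d.keys) :
    (L.foldl (fun d ch => d.modify (String.ofList [ch]) "" (f ch)) d).keys = d.keys := by
  induction L generalizing d with
  | nil => rfl
  | cons a L ih =>
    rw [List.foldl_cons]
    have hk : (d.modify (String.ofList [a]) "" (f a)).keys = d.keys := by
      rw [PySem.Dict.keys_modify, PySem.Dict.keys_insert_of_contains]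
      exact (PySem.Dict.contains_iff_mem_keys _ _).mpr (h a List.mem_cons_self)
    rw [ih _ (fun ch hm => by rw [hk]; exact h ch (List.mem_cons_of_mem _ hm)), hk]

-- the three modify-passes over a dict whose items are exactly the seven letter keys
lemma pvA_core (g : Int → Char → String) (d0 : PySem.Dict String String)
    (hitems0 : d0.items = pvLetters.map (fun ch => (String.ofList [ch], ""))) :
    ((([3, 4, 6] : List Int).foldl (fun d i =>
        pvLetters.foldl (fun d ch =>
          d.modify (String.ofList [ch]) "" (fun v => v ++ g i ch)) d) d0).items)
    = pvLetters.map (fun ch => (String.ofList [ch], "" ++ g 3 ch ++ g 4 ch ++ g 6 ch)) := by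
  have hkeys0 : d0.keys = pvLetters.map (fun ch => String.ofList [ch]) := by
    show d0.items.map Prod.fst = _
    rw [hitems0, List.map_map]
    rfl
  have hnd0 : d0.keys.Nodup := by rw [hkeys0]; decide
  have hmemk : ∀ (d : PySem.Dict String String), d.keys = d0.keys →
      ∀ ch ∈ pvLetters, String.ofList [ch] ∈ d.keys := by
    intro d hd ch hm
    rw [hd, hkeys0]; exact List.mem_map_of_mem hm
  simp only [List.foldl_cons, List.foldl_nil]
  have hk3 := pv_keys_fold pvLetters (fun ch v => v ++ g 3 ch) d0 (hmemk d0 rfl)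
  have hk4 := pv_keys_fold pvLetters (fun ch v => v ++ g 4 ch) _ (hmemk _ hk3)
  have hk6 := pv_keys_fold pvLetters (fun ch v => v ++ g 6 ch) _ (hmemk _ (hk4.trans hk3))
  have hkeysD := (hk6.trans hk4).trans hk3
  have hndD := hnd0
  rw [← hkeysD] at hndD
  rw [PySem.Dict.items_eq_map_keys _ hndD "", hkeysD, hkeys0, List.map_map]
  refine List.map_congr_left (fun ch hm => ?_)
  have hndL : pvLetters.Nodup := by decide
  simp only [Function.comp]
  rw [pv_getD_fold_mem _ _ _ _ hndL hm, pv_getD_fold_mem _ _ _ _ hndL hm,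
    pv_getD_fold_mem _ _ _ _ hndL hm,
    PySem.Dict.getD_of_mem_items d0 (by rw [hitems0]; exact List.mem_map_of_mem hm) hnd0]

lemma pvA_items (g : Int → Char → String) :
    ((([3, 4, 6] : List Int).foldl (fun d i =>
        pvLetters.foldl (fun d ch =>
          d.modify (String.ofList [ch]) "" (fun v => v ++ g i ch)) d)
      (pvLetters.foldl
        (fun d ch => d.insert (String.ofList [ch]) "") PySem.Dict.empty)).items)
    = pvLetters.map
        (fun ch => (String.ofList [ch], "" ++ g 3 ch ++ g 4 ch ++ g 6 ch)) := by
  apply pvA_core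
  rw [PySem.Dict.items_foldl_insert_fresh _ _ _ _
    (fun a _ => PySem.Dict.contains_empty _) (by decide)]
  rfl

lemma pvJoin3 (x y z : String) :
    "" ++ x ++ y ++ z = PySem.Str.join "" [x, y, z] := by
  apply String.toList_injective
  simp [PySem.Chars.join_cons_cons]

-- ===== VERDICT (by name: the statement is the Claim_ definition above) =====
theorem calculate_codes_spec : Claim_equal_calculate_codes := by
  intro line_inputs _
  show calculate_codes line_inputs = calculate_codes_alt line_inputs
  unfold calculate_codes calculate_codes_alt
  rw [show (line_inputs.foldl (fun d s =>
      let n : Int := PySem.Str.len s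
      if n == 3 || n == 4 || n == 6 then
        (PySem.Set.ofList s.toList).foldl
          (fun d c => d.insert (n, c) (d.getD (n, c) 0 + 1)) d
      else d) PySem.Dict.empty) = pvTable line_inputs PySem.Dict.empty from rfl]
  simp only [pv_toList_abc]
  rw [pvA_items (fun i ch => PySem.Int.toStr
      ((line_inputs.filter
          (fun s => PySem.Str.len s == i && PySem.Str.isIn (String.ofList [ch]) s)).length : Int))]
  refine List.map_congr_left (fun ch _ => ?_)
  simp only [List.map]
  rw [pvTable_getD _ _ 3 ch (Or.inl rfl), pvTable_getD _ _ 4 ch (Or.inr (Or.inl rfl)),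
      pvTable_getD _ _ 6 ch (Or.inr (Or.inr rfl))]
  simp only [PySem.Dict.getD_empty, zero_add]
  rw [← pvJoin3]
  simp only [pvCnt, List.countP_eq_length_filter]
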